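-- pv_equiv track=rewrite | github.com/MiguelRomanCL/nonogram_solver | nonogram_solver.py | is_valid_line
-- ===== SOURCE A (Python) =====
-- def is_valid_line(line, hints):
--     groups = []
--     group_count = 0
--     for cell in line:
--         if cell == 1:
--             group_count += 1
--         elif group_count:
--             groups.append(group_count)
--             group_count = 0
--     if group_count:
--         groups.append(group_count)
--     return groups == hints
-- ===== SOURCE B (Python) =====
-- def is_valid_line(line, hints):
--     # Greedy matcher: consume the line hint by hint instead of building a
--     # run-length list; early exit on the first mismatch.
--     i, n = 0, len(line)
--     for h in hints:
--         while i < n and line[i] != 1: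
--             i += 1
--         if i == n:
--             return False
--         j = i
--         while j < n and line[j] == 1:
--             j += 1
--         if j - i != h:
--             return False
--         i = j
--     return all(cell != 1 for cell in line[i:])
-- ===== Notes on version B (the rewrite author's own statement) =====
-- stated objective: alternative
-- what changed: Replaced A's extract-all-runs-then-compare-lists with a greedy matcher that walks the line once per hint, checking each expected run in place and exiting early on the first mismatch; no run-length list is ever built.
import Mathlib
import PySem

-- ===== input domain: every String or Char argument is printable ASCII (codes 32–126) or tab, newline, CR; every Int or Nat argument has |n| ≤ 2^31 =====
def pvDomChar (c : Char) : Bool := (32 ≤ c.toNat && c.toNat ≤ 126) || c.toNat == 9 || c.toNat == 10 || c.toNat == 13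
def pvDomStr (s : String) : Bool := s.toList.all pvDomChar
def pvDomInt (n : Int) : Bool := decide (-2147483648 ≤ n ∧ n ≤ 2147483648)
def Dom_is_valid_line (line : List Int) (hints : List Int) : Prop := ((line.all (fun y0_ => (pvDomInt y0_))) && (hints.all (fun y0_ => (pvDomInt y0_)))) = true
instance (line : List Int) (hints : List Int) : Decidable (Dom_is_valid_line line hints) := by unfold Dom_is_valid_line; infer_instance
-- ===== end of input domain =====

-- B replaces A's build-the-run-length-list-and-compare with a greedy in-place matcher over the hints (alternative decomposition, early exit).


-- ===== PORT A =====
-- loop body and post-loop flush of A, named for the proofs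
def stepA (st : List Int × Int) (cell : Int) : List Int × Int :=
  if cell == 1 then (st.1, st.2 + 1)
  else if st.2 ≠ 0 then (st.1 ++ [st.2], 0)
  else st

def flushA (st : List Int × Int) : List Int :=
  if st.2 ≠ 0 then st.1 ++ [st.2] else st.1

def is_valid_line (line : List Int) (hints : List Int) : Bool :=
  -- literal port of A: foldl carries (groups, group_count); final flush after the loop
  flushA (line.foldl stepA ([], 0)) == hints

-- ===== PORT B =====
-- Source B's first while loop: advance past non-1 cells (the suffix of line from i)
def bSkip : List Int → List Int
  | [] => []
  | x :: xs => if x == 1 then x :: xs else bSkip xs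

-- Source B's second while loop: count the run of 1s (j - i) and return the suffix from j
def bRun : List Int → Int × List Int
  | [] => (0, [])
  | x :: xs => if x == 1 then ((bRun xs).1 + 1, (bRun xs).2) else (0, x :: xs)

-- Source B's for-loop over hints; `rest` is line's suffix from index i
def bLoop (rest : List Int) : List Int → Bool
  | [] => rest.all (fun cell => !(cell == 1))   -- `all(cell != 1 for cell in line[i:])`
  | h :: hs =>
      match bSkip rest with
      | [] => false                              -- `if i == n: return False`
      | s => if (bRun s).1 != h then false else bLoop (bRun s).2 hs

def is_valid_line_alt (line : List Int) (hints : List Int) : Bool :=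
  bLoop line hints

-- ===== PRECONDITION & SPEC =====
def Spec_is_valid_line (line : List Int) (hints : List Int) (out : Bool) : Prop := out = is_valid_line_alt line hints
instance (line : List Int) (hints : List Int) (out : Bool) : Decidable (Spec_is_valid_line line hints out) := by unfold Spec_is_valid_line; infer_instance

-- ===== CLAIM (what is proved, stated in full; the proofs are below) =====
def Claim_equal_is_valid_line : Prop := ∀ (line : List Int) (hints : List Int), Dom_is_valid_line line hints → Spec_is_valid_line line hints (is_valid_line line hints)

-- ===== LEMMAS AND PROOFS =====
-- common reference: runs of 1s with a pending count c
def onesRuns (c : Int) : List Int → List Int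
  | [] => if c ≠ 0 then [c] else []
  | x :: xs => if x == 1 then onesRuns (c + 1) xs
               else if c ≠ 0 then c :: onesRuns 0 xs else onesRuns 0 xs

theorem foldA_eq (line : List Int) : ∀ (gs : List Int) (c : Int),
    flushA (line.foldl stepA (gs, c)) = gs ++ onesRuns c line := by
  induction line with
  | nil =>
    intro gs c
    simp only [List.foldl_nil, flushA, onesRuns]
    split_ifs <;> simp
  | cons x xs ih =>
    intro gs c
    rw [List.foldl_cons]
    by_cases hx : x == 1
    · rw [show stepA (gs, c) x = (gs, c + 1) by simp [stepA, hx]]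
      rw [ih]
      simp [onesRuns, hx]
    · by_cases hc : c ≠ 0
      · rw [show stepA (gs, c) x = (gs ++ [c], 0) by simp [stepA, hx, hc]]
        rw [ih]
        simp [onesRuns, hx, hc]
      · rw [show stepA (gs, c) x = (gs, c) by simp_all [stepA]]
        have hc0 : c = 0 := by omega
        subst hc0
        rw [ih]
        simp [onesRuns, hx]

-- skipping non-1 cells does not change the runs when no run is pending
theorem onesRuns_skip (xs : List Int) : onesRuns 0 xs = onesRuns 0 (bSkip xs) := by
  induction xs with
  | nil => rfl
  | cons x t ih =>
    by_cases hx : x == 1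
    · simp [bSkip, hx]
    · simp [bSkip, onesRuns, hx, ih]

-- a pending positive run plus bRun's count forms the next run
theorem onesRuns_run (xs : List Int) : ∀ (c : Int), 1 ≤ c →
    onesRuns c xs = (c + (bRun xs).1) :: onesRuns 0 (bRun xs).2 := by
  induction xs with
  | nil => intro c hc; simp [onesRuns, bRun, show c ≠ 0 by omega]
  | cons x t ih =>
    intro c hc
    by_cases hx : x == 1
    · simp only [onesRuns, bRun, hx, if_pos]
      rw [ih (c + 1) (le_trans hc (by omega))]
      ring_nf
    · simp [onesRuns, bRun, hx, show c ≠ 0 by omega]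

-- the result of bSkip is empty or starts with 1
theorem bSkip_head (xs : List Int) :
    bSkip xs = [] ∨ ∃ t, bSkip xs = (1 : Int) :: t := by
  induction xs with
  | nil => exact Or.inl rfl
  | cons x t ih =>
    by_cases hx : x == 1
    · right
      exact ⟨t, by simp only [bSkip, hx, if_pos]; simp [beq_iff_eq] at hx; rw [hx]⟩
    · simpa [bSkip, hx] using ih

-- onesRuns 0 is empty iff the list has no 1s
theorem onesRuns_nil_iff (xs : List Int) :
    (onesRuns 0 xs = []) ↔ (xs.all (fun cell => !(cell == 1)) = true) := by
  induction xs with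
  | nil => simp [onesRuns]
  | cons x t ih =>
    by_cases hx : x == 1
    · have hr : onesRuns 1 t = ((1 : Int) + (bRun t).1) :: onesRuns 0 (bRun t).2 :=
        onesRuns_run t 1 (by omega)
      simp [onesRuns, hx, hr]
    · simp [onesRuns, hx, ih]

-- the heart: B's matcher decides equality with A's run list
theorem bLoop_eq (hints : List Int) : ∀ (rest : List Int),
    bLoop rest hints = (onesRuns 0 rest == hints) := by
  induction hints with
  | nil =>
    intro rest
    by_cases hb : rest.all (fun cell => !(cell == 1)) = true
    · simp [bLoop, hb, (onesRuns_nil_iff rest).mpr hb]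
    · have hne : onesRuns 0 rest ≠ [] := fun he => hb ((onesRuns_nil_iff rest).mp he)
      simp [bLoop, hb, hne]
  | cons h hs ih =>
    intro rest
    rw [show onesRuns 0 rest = onesRuns 0 (bSkip rest) from onesRuns_skip rest]
    rcases bSkip_head rest with he | ⟨t, ht⟩
    · simp [bLoop, he, onesRuns]
    · rw [ht]
      have h1 : onesRuns 0 ((1 : Int) :: t) = (1 + (bRun t).1) :: onesRuns 0 (bRun t).2 := by
        simp only [onesRuns]
        rw [if_pos (by decide)]
        exact onesRuns_run t 1 (by omega)
      have h2 : bRun ((1 : Int) :: t) = ((bRun t).1 + 1, (bRun t).2) := by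
        simp [bRun]
      simp only [bLoop, ht, h1, h2]
      by_cases hh : (bRun t).1 + 1 = h
      · simp [hh, ih, show (1 : Int) + (bRun t).1 = h by omega]
      · have : ¬ ((1 : Int) + (bRun t).1 = h) := by omega
        simp [hh, this]

-- ===== VERDICT (by name: the statement is the Claim_ definition above) =====
theorem is_valid_line_spec : Claim_equal_is_valid_line := by
  intro line hints _
  unfold Spec_is_valid_line is_valid_line is_valid_line_alt
  rw [foldA_eq line [] 0, bLoop_eq hints line]
  simp
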